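-- pv_equiv track=rewrite | github.com/brandondelpozo/ch2-sag | space.py | sortArrayEvenLeftAndOddRight
-- ===== SOURCE A (Python) =====
-- def sortArrayEvenLeftAndOddRight(arrayNums):
--     arrayLeft = []
--     arrayRigh = []
--     for i in arrayNums:
--         if i % 2 == 0:
--             arrayLeft.append(i)
--         else:
--             arrayRigh.append(i) # O(n^2)
--     return arrayLeft + arrayRigh
-- ===== SOURCE B (Python) =====
-- def sortArrayEvenLeftAndOddRight(arrayNums):
--     return sorted(arrayNums, key=lambda x: x % 2)
-- ===== Notes on version B (the rewrite author's own statement) =====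
-- stated objective: idiomatic
-- what changed: Replaced the manual two-bucket partition loop with a single stable sort keyed on parity (sorted with key x % 2), whose stability preserves each group's original order.
import Mathlib
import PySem

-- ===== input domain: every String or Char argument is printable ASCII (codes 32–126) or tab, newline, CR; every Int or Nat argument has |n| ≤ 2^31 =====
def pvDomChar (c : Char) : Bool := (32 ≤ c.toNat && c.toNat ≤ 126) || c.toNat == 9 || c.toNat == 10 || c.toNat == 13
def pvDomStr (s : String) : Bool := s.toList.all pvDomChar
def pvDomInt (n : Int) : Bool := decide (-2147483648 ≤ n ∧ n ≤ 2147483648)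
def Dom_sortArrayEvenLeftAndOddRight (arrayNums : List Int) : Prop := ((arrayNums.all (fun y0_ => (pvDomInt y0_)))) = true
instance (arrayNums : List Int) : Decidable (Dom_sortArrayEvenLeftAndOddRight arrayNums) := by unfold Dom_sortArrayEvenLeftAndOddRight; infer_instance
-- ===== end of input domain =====

-- B replaces A's two-bucket partition loop with one stable sort keyed on parity (idiomatic; same return value).

-- ===== PORT A =====
-- for i in arrayNums: append to arrayLeft if i % 2 == 0 else to arrayRigh; return arrayLeft + arrayRigh
def sortArrayEvenLeftAndOddRight (arrayNums : List Int) : List Int :=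
  let acc := arrayNums.foldl
    (fun (acc : List Int × List Int) i =>
      if PySem.Int.mod i 2 = 0 then (acc.1 ++ [i], acc.2) else (acc.1, acc.2 ++ [i]))
    ([], [])
  acc.1 ++ acc.2

-- ===== PORT B =====
-- return sorted(arrayNums, key=lambda x: x % 2)
def sortArrayEvenLeftAndOddRight_alt (arrayNums : List Int) : List Int :=
  PySem.List.sorted arrayNums (fun x => PySem.Int.mod x 2) false

-- ===== PRECONDITION & SPEC =====
def Spec_sortArrayEvenLeftAndOddRight (arrayNums : List Int) (out : List Int) : Prop := out = sortArrayEvenLeftAndOddRight_alt arrayNums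
instance (arrayNums : List Int) (out : List Int) : Decidable (Spec_sortArrayEvenLeftAndOddRight arrayNums out) := by unfold Spec_sortArrayEvenLeftAndOddRight; infer_instance

-- ===== CLAIM (what is proved, stated in full; the proofs are below) =====
def Claim_equal_sortArrayEvenLeftAndOddRight : Prop := ∀ (arrayNums : List Int), Dom_sortArrayEvenLeftAndOddRight arrayNums → Spec_sortArrayEvenLeftAndOddRight arrayNums (sortArrayEvenLeftAndOddRight arrayNums)

-- ===== LEMMAS AND PROOFS =====

-- the parity key used by both sides
def pvKey (x : Int) : Int := PySem.Int.mod x 2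

theorem pvKey_cases (x : Int) : pvKey x = 0 ∨ pvKey x = 1 := by
  simp only [pvKey, PySem.Int.mod, Int.fmod_eq_emod]
  omega

-- A's loop, started from buckets (l, r), ends at (l ++ evens, r ++ odds)
theorem foldA_eq (xs : List Int) : ∀ (l r : List Int),
    xs.foldl
      (fun (acc : List Int × List Int) i =>
        if PySem.Int.mod i 2 = 0 then (acc.1 ++ [i], acc.2) else (acc.1, acc.2 ++ [i]))
      (l, r)
    = (l ++ xs.filter (fun i => pvKey i = 0), r ++ xs.filter (fun i => ¬ pvKey i = 0)) := by
  induction xs with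
  | nil => simp
  | cons x xs ih =>
    intro l r
    simp only [List.foldl_cons, List.filter_cons]
    by_cases h : PySem.Int.mod x 2 = 0
    · simp only [h, if_pos, ih]
      have hk : pvKey x = 0 := h
      simp [hk, List.append_assoc]
    · simp only [h, if_neg, ih, if_false]
      have hk : ¬ pvKey x = 0 := h
      simp [hk, List.append_assoc]

-- insertBy skips a prefix it is not "before"
theorem insertBy_skip (before : Int → Int → Bool) (x : Int) (E O : List Int)
    (hE : ∀ y ∈ E, before x y = false) :
    PySem.List.insertBy before x (E ++ O) = E ++ PySem.List.insertBy before x O := by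
  induction E with
  | nil => simp
  | cons e E ih =>
    have he : before x e = false := hE e (by simp)
    simp only [List.cons_append, PySem.List.insertBy, he]
    simp [ih (fun y hy => hE y (by simp [hy]))]

-- insertBy puts x in front of a list it is "before" everywhere
theorem insertBy_front (before : Int → Int → Bool) (x : Int) (O : List Int)
    (hO : ∀ y ∈ O, before x y = true) :
    PySem.List.insertBy before x O = x :: O := by
  cases O with
  | nil => rfl
  | cons o O => simp [PySem.List.insertBy, hO o (by simp)]

-- insertBy appends x to a list it is "before" nowhere
theorem insertBy_end (before : Int → Int → Bool) (x : Int) (O : List Int)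
    (hO : ∀ y ∈ O, before x y = false) :
    PySem.List.insertBy before x O = O ++ [x] := by
  induction O with
  | nil => rfl
  | cons o O ih =>
    simp only [PySem.List.insertBy, hO o (by simp)]
    simp [ih (fun y hy => hO y (by simp [hy]))]

-- the stable insertion sort on a 0/1 key keeps key-0 elements left, in order
theorem foldB_eq (xs : List Int) : ∀ (E O : List Int),
    (∀ y ∈ E, pvKey y = 0) → (∀ y ∈ O, pvKey y = 1) →
    xs.foldl (fun acc x => PySem.List.insertBy (fun a b => decide (pvKey a < pvKey b)) x acc) (E ++ O)
    = (E ++ xs.filter (fun i => pvKey i = 0)) ++ (O ++ xs.filter (fun i => ¬ pvKey i = 0)) := by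
  induction xs with
  | nil => simp [List.append_assoc]
  | cons x xs ih =>
    intro E O hE hO
    simp only [List.foldl_cons, List.filter_cons]
    rcases pvKey_cases x with hk | hk
    · -- even: inserted right after E
      have hstep : PySem.List.insertBy (fun a b => decide (pvKey a < pvKey b)) x (E ++ O)
          = (E ++ [x]) ++ O := by
        rw [insertBy_skip _ _ _ _ (fun y hy => by simp [hk, hE y hy]),
            insertBy_front _ _ _ (fun y hy => by simp [hk, hO y hy])]
        simp
      rw [hstep, ih (E ++ [x]) O
            (by intro y hy; rcases List.mem_append.mp hy with h | h
                · exact hE y h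
                · simp at h; simpa [h] using hk) hO]
      simp [hk, List.append_assoc]
    · -- odd: appended at the very end
      have hstep : PySem.List.insertBy (fun a b => decide (pvKey a < pvKey b)) x (E ++ O)
          = E ++ (O ++ [x]) := by
        rw [insertBy_skip _ _ _ _ (fun y hy => by simp [hk, hE y hy]),
            insertBy_end _ _ _ (fun y hy => by have := hO y hy; simp [hk, this])]
      rw [hstep, ih E (O ++ [x]) hE
            (by intro y hy; rcases List.mem_append.mp hy with h | h
                · exact hO y h
                · simp at h; simpa [h] using hk)]
      have hk0 : ¬ pvKey x = 0 := by omega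
      simp [hk0, List.append_assoc]

-- ===== VERDICT (by name: the statement is the Claim_ definition above) =====
theorem sortArrayEvenLeftAndOddRight_spec : Claim_equal_sortArrayEvenLeftAndOddRight := by
  intro xs _
  show sortArrayEvenLeftAndOddRight xs = sortArrayEvenLeftAndOddRight_alt xs
  have hA := foldA_eq xs [] []
  have hB := foldB_eq xs [] [] (by simp) (by simp)
  simp only [List.nil_append] at hA hB
  simp only [sortArrayEvenLeftAndOddRight, sortArrayEvenLeftAndOddRight_alt,
    PySem.List.sorted, hA]
  show _ = xs.foldl (fun acc x => PySem.List.insertBy (fun a b => decide (pvKey a < pvKey b)) x acc) ([] ++ [])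
  simp only [List.nil_append]
  exact hB.symm
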